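-- pv_equiv track=rewrite | github.com/ArtNooijen/WFC-AI-OPEN | dnd_map_gen_wfc_AI/Logic/imagesself.py | get_all_rotations
-- ===== SOURCE A (Python) =====
-- def get_all_rotations(pixelMatrix):
--     """
--     Return original array as well as rotated by 90, 180 and 270 degrees in the form of tuples
--     """
--     pixelMatrix_rotated_1 = [[pixelMatrix[j][i] for j in range(len(pixelMatrix))] for i in range(len(pixelMatrix[0])-1,-1,-1)]
--     pixelMatrix_rotated_2 = [[pixelMatrix_rotated_1[j][i] for j in range(len(pixelMatrix_rotated_1))] for i in range(len(pixelMatrix_rotated_1[0])-1,-1,-1)]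
--     pixelMatrix_rotated_3 = [[pixelMatrix_rotated_2[j][i] for j in range(len(pixelMatrix_rotated_2))] for i in range(len(pixelMatrix_rotated_2[0])-1,-1,-1)]
--     return tuple(tuple(row) for row in pixelMatrix), \
--             tuple(tuple(row) for row in pixelMatrix_rotated_1), \
--             tuple(tuple(row) for row in pixelMatrix_rotated_2), \
--             tuple(tuple(row) for row in pixelMatrix_rotated_3)
-- ===== SOURCE B (Python) =====
-- def get_all_rotations(pixelMatrix):
--     """
--     Return original array as well as rotated by 90, 180 and 270 degrees in the form of tuples
--     """
--     rows, cols = len(pixelMatrix), len(pixelMatrix[0])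
--     rot1 = [[pixelMatrix[c][cols - 1 - r] for c in range(rows)] for r in range(cols)]
--     rot2 = [[pixelMatrix[rows - 1 - r][cols - 1 - c] for c in range(cols)] for r in range(rows)]
--     rot3 = [[pixelMatrix[rows - 1 - c][r] for c in range(rows)] for r in range(cols)]
--     return (tuple(tuple(row) for row in pixelMatrix),
--             tuple(tuple(row) for row in rot1),
--             tuple(tuple(row) for row in rot2),
--             tuple(tuple(row) for row in rot3))
-- ===== Notes on version B (the rewrite author's own statement) =====
-- stated objective: alternative
-- what changed: A builds each rotation by feeding the previous rotation through the same 90-degree comprehension (a three-stage pipeline); B computes the 90/180/270-degree rotations each directly from the original matrix with its own index formula.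
import Mathlib
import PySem

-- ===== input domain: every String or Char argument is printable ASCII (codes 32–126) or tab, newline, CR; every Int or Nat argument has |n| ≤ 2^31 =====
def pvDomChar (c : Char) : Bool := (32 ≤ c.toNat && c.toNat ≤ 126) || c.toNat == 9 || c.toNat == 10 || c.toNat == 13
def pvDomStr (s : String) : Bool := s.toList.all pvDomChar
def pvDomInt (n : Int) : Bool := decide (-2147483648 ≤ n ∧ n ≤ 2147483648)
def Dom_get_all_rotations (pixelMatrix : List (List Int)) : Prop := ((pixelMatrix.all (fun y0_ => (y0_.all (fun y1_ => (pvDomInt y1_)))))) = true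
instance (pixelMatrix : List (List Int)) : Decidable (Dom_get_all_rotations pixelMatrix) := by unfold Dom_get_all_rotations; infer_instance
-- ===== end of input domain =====

-- B replaces A's sequential pipeline (one 90° rotation applied three times in a row) by three
-- independent index comprehensions, each reading its rotation directly off the original matrix.

-- ===== PORT A =====
-- one 90°-rotation comprehension, A's '[[m[j][i] for j in range(len(m))] for i in range(len(m[0])-1,-1,-1)]'
def pvRotA (m : List (List Int)) : List (List Int) :=
  (PySem.List.pyRange (((PySem.List.pyGetD m 0 []).length : Int) - 1) (-1) (-1)).map
    (fun i => (PySem.List.pyRange 0 (m.length : Int) 1).map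
      (fun j => PySem.List.pyGetD (PySem.List.pyGetD m j []) i 0))

def get_all_rotations (pixelMatrix : List (List Int)) : List (List (List Int)) :=
  let r1 := pvRotA pixelMatrix
  let r2 := pvRotA r1
  let r3 := pvRotA r2
  [pixelMatrix, r1, r2, r3]

-- ===== PORT B =====
def get_all_rotations_alt (pixelMatrix : List (List Int)) : List (List (List Int)) :=
  let rows : Int := pixelMatrix.length
  let cols : Int := (PySem.List.pyGetD pixelMatrix 0 []).length
  let at' : Int → Int → Int := fun r c =>
    PySem.List.pyGetD (PySem.List.pyGetD pixelMatrix r []) c 0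
  [ pixelMatrix,
    (PySem.List.pyRange 0 cols 1).map (fun r =>
      (PySem.List.pyRange 0 rows 1).map (fun c => at' c (cols - 1 - r))),
    (PySem.List.pyRange 0 rows 1).map (fun r =>
      (PySem.List.pyRange 0 cols 1).map (fun c => at' (rows - 1 - r) (cols - 1 - c))),
    (PySem.List.pyRange 0 cols 1).map (fun r =>
      (PySem.List.pyRange 0 rows 1).map (fun c => at' (rows - 1 - c) r)) ]

-- ===== PRECONDITION & SPEC =====
-- Pre_ excludes exactly the inputs on which Python A raises IndexError: the empty matrix and an
-- empty first row (the 'pixelMatrix[0]' / 'rotated[0]' lookups fail), and matrices with some row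
-- shorter than the first row ('pixelMatrix[j][i]' fails for some i).
def Pre_get_all_rotations (pixelMatrix : List (List Int)) : Prop :=
  0 < pixelMatrix.length ∧ 0 < (PySem.List.pyGetD pixelMatrix 0 []).length ∧
    ∀ row ∈ pixelMatrix, (PySem.List.pyGetD pixelMatrix 0 []).length ≤ row.length
instance (pixelMatrix : List (List Int)) : Decidable (Pre_get_all_rotations pixelMatrix) := by
  unfold Pre_get_all_rotations; infer_instance

def pvWitness_get_all_rotations : List (List Int) := [[1, 2], [3, 4]]

def Spec_get_all_rotations (pixelMatrix : List (List Int)) (out : List (List (List Int))) : Prop := out = get_all_rotations_alt pixelMatrix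
instance (pixelMatrix : List (List Int)) (out : List (List (List Int))) : Decidable (Spec_get_all_rotations pixelMatrix out) := by unfold Spec_get_all_rotations; infer_instance

-- ===== CLAIM (what is proved, stated in full; the proofs are below) =====
def Claim_equal_get_all_rotations : Prop := ∀ (pixelMatrix : List (List Int)), Dom_get_all_rotations pixelMatrix → Pre_get_all_rotations pixelMatrix → Spec_get_all_rotations pixelMatrix (get_all_rotations pixelMatrix)

-- ===== LEMMAS AND PROOFS =====

-- the common matrix shape: R rows, C columns, entry f r c
def pvMk (R C : Int) (f : Int → Int → Int) : List (List Int) :=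
  (PySem.List.pyRange 0 R 1).map (fun r => (PySem.List.pyRange 0 C 1).map (fun c => f r c))

def pvGet (m : List (List Int)) (r c : Int) : Int :=
  PySem.List.pyGetD (PySem.List.pyGetD m r []) c 0

theorem pvMk_congr (R C : Int) (f g : Int → Int → Int)
    (h : ∀ r c, 0 ≤ r → r < R → 0 ≤ c → c < C → f r c = g r c) :
    pvMk R C f = pvMk R C g := by
  unfold pvMk
  refine List.map_congr_left (fun r hr => ?_)
  rw [PySem.List.mem_pyRange_one] at hr
  refine List.map_congr_left (fun c hc => ?_)
  rw [PySem.List.mem_pyRange_one] at hc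
  exact h r c hr.1 hr.2 hc.1 hc.2

-- A's reversed-range comprehension, in the common shape
theorem pvRotA_shape (m : List (List Int)) :
    pvRotA m = pvMk ((PySem.List.pyGetD m 0 []).length : Int) (m.length : Int)
      (fun r c => pvGet m c (((PySem.List.pyGetD m 0 []).length : Int) - 1 - r)) := by
  unfold pvRotA pvMk pvGet
  simp only [PySem.List.pyRange_neg_one, PySem.List.pyRange_one, List.map_map]
  norm_num

theorem pvMk_get (R C : Int) (f : Int → Int → Int) (r c : Int)
    (hr0 : 0 ≤ r) (hrR : r < R) (hc0 : 0 ≤ c) (hcC : c < C) :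
    pvGet (pvMk R C f) r c = f r c := by
  unfold pvGet pvMk
  rw [PySem.List.pyGetD_map_pyRange_of_nonneg _ _ _ _ hr0 hrR,
      PySem.List.pyGetD_map_pyRange_of_nonneg _ _ _ _ hc0 hcC]

theorem pvMk_row0 (R C : Int) (f : Int → Int → Int) (hR : 0 < R) (hC : 0 ≤ C) :
    ((PySem.List.pyGetD (pvMk R C f) 0 []).length : Int) = C := by
  unfold pvMk
  rw [PySem.List.pyGetD_map_pyRange_of_nonneg _ _ _ _ le_rfl hR]
  simp [PySem.List.length_pyRange_one]
  omega

theorem pvMk_len (R C : Int) (f : Int → Int → Int) (hR : 0 ≤ R) :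
    ((pvMk R C f).length : Int) = R := by
  unfold pvMk
  simp [PySem.List.length_pyRange_one]
  omega

-- rotating a rectangular R×C matrix of entries f
theorem pvRotA_mk (R C : Int) (f : Int → Int → Int) (hR : 0 < R) (hC : 0 < C) :
    pvRotA (pvMk R C f) = pvMk C R (fun r c => f c (C - 1 - r)) := by
  rw [pvRotA_shape]
  simp only [pvMk_row0 R C f hR hC.le, pvMk_len R C f hR.le]
  exact pvMk_congr _ _ _ _ (fun r c hr0 hrC hc0 hcR =>
    pvMk_get R C f c (C - 1 - r) hc0 hcR (by omega) (by omega))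

-- ===== VERDICT (by name: the statement is the Claim_ definition above) =====
theorem get_all_rotations_spec : Claim_equal_get_all_rotations := by
  intro m _ hpre
  obtain ⟨hrows, hcols, _⟩ := hpre
  have hR : (0 : Int) < (m.length : Int) := by exact_mod_cast hrows
  have hC : (0 : Int) < ((PySem.List.pyGetD m 0 []).length : Int) := by exact_mod_cast hcols
  unfold Spec_get_all_rotations get_all_rotations get_all_rotations_alt
  dsimp only
  rw [pvRotA_shape m, pvRotA_mk _ _ _ hC hR, pvRotA_mk _ _ _ hR hC]
  have h3 : pvMk ((PySem.List.pyGetD m 0 []).length : Int) (m.length : Int)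
      (fun r c => pvGet m (((m.length : Int)) - 1 - c)
        (((PySem.List.pyGetD m 0 []).length : Int) - 1 -
          (((PySem.List.pyGetD m 0 []).length : Int) - 1 - r)))
      = pvMk ((PySem.List.pyGetD m 0 []).length : Int) (m.length : Int)
      (fun r c => pvGet m (((m.length : Int)) - 1 - c) r) := by
    refine pvMk_congr _ _ _ _ (fun r c _ _ _ _ => ?_)
    congr 1
    omega
  rw [h3]
  simp only [pvMk, pvGet]
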